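-- pv_equiv track=rewrite | github.com/dev25bansal-ops/quantum-safe-optimization | api/services/webhooks.py | _host_matches_allowlist
-- ===== SOURCE A (Python) =====
-- def _host_matches_allowlist(host: str, allowlist: list[str]) -> bool:
--     """Check if host matches any allowlist entry (exact or suffix)."""
--     for allowed in allowlist:
--         allowed = allowed.strip().lower()
--         if not allowed:
--             continue
--         if host == allowed or host.endswith(f".{allowed}"):
--             return True
--     return False
-- ===== SOURCE B (Python) =====
-- def _host_matches_allowlist(host: str, allowlist: list[str]) -> bool:
--     """Check if host matches any allowlist entry (exact or suffix)."""
--     cleaned = {a.strip().lower() for a in allowlist if a.strip()}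
--     candidates = [host] + [host[i + 1:] for i, c in enumerate(host) if c == "."]
--     return any(c in cleaned for c in candidates)
-- ===== Notes on version B (the rewrite author's own statement) =====
-- stated objective: idiomatic
-- what changed: Instead of scanning the allowlist and testing exact-or-dot-suffix per entry, B builds a set of cleaned entries once and checks membership of the host and of each of its post-dot suffixes.
import Mathlib
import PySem

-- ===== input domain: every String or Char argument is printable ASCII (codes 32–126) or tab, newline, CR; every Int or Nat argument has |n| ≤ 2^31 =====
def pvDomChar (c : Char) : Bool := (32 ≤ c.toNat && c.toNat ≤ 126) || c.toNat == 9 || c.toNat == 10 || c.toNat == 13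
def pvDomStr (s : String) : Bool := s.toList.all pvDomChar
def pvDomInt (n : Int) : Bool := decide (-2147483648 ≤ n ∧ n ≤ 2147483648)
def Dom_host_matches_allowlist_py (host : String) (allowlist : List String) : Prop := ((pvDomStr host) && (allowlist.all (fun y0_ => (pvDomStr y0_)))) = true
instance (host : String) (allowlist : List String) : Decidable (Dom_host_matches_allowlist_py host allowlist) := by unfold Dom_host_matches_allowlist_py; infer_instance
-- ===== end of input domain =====

-- B replaces A's per-entry exact-or-dot-suffix scan by one cleaned set of entries
-- plus membership tests on the host and its post-dot suffixes (objective: idiomatic).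

-- ===== PORT A =====
def host_matches_allowlist_py (host : String) (allowlist : List String) : Bool :=
  match allowlist with
  | [] => false
  | a :: rest =>
    let allowed := PySem.Str.lower (PySem.Str.strip a)
    if allowed = "" then host_matches_allowlist_py host rest
    else if (host == allowed) || PySem.Str.endswith host ("." ++ allowed) then true
    else host_matches_allowlist_py host rest

-- ===== PORT B =====
def host_matches_allowlist_py_alt (host : String) (allowlist : List String) : Bool :=
  let cleaned : PySem.Set String :=
    PySem.Set.ofList ((allowlist.filter (fun a => !(PySem.Str.strip a == ""))).map
      (fun a => PySem.Str.lower (PySem.Str.strip a)))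
  -- host[i+1:] for the nonnegative index i from enumerate(host) is exactly drop (i+1)
  let candidates : List String :=
    host :: (PySem.List.enumerate host.toList 0).filterMap
      (fun p => if p.2 = '.' then some (String.ofList (host.toList.drop (p.1.toNat + 1))) else none)
  candidates.any (fun c => PySem.Set.contains cleaned c)

-- ===== PRECONDITION & SPEC =====
def Spec_host_matches_allowlist_py (host : String) (allowlist : List String) (out : Bool) : Prop := out = host_matches_allowlist_py_alt host allowlist
instance (host : String) (allowlist : List String) (out : Bool) : Decidable (Spec_host_matches_allowlist_py host allowlist out) := by unfold Spec_host_matches_allowlist_py; infer_instance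

-- ===== CLAIM (what is proved, stated in full; the proofs are below) =====
def Claim_equal_host_matches_allowlist_py : Prop := ∀ (host : String) (allowlist : List String), Dom_host_matches_allowlist_py host allowlist → Spec_host_matches_allowlist_py host allowlist (host_matches_allowlist_py host allowlist)

-- ===== LEMMAS AND PROOFS =====

-- the characterisation both programs are reduced to
def MatchesProp (host : String) (allowlist : List String) : Prop :=
  ∃ a ∈ allowlist, PySem.Str.strip a ≠ "" ∧
    (host = PySem.Str.lower (PySem.Str.strip a) ∨
     ∃ k, ∃ h : k < host.toList.length, host.toList[k] = '.' ∧
       host.toList.drop (k + 1) = (PySem.Str.lower (PySem.Str.strip a)).toList)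

lemma lower_eq_empty_iff (s : String) : PySem.Str.lower s = "" ↔ s = "" := by
  rw [← String.toList_eq_nil_iff, ← String.toList_eq_nil_iff, PySem.Str.toList_lower,
    PySem.Chars.lower, List.map_eq_nil_iff]

lemma suffix_dot_iff (w l : List Char) :
    ('.' :: w) <:+ l ↔ ∃ k, ∃ h : k < l.length, l[k] = '.' ∧ l.drop (k + 1) = w := by
  constructor
  · rintro ⟨t, rfl⟩
    refine ⟨t.length, by simp, ?_, ?_⟩
    · rw [List.getElem_append_right (by omega)]
      simp
    · have h1 : t ++ '.' :: w = (t ++ ['.']) ++ w := by simp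
      have h2 : t.length + 1 = (t ++ ['.']).length := by simp
      rw [h1, h2, List.drop_left]
  · rintro ⟨k, h, hd, hdrop⟩
    refine ⟨l.take k, ?_⟩
    have h1 : l[k] :: l.drop (k + 1) = l.drop k := List.getElem_cons_drop h
    rw [hd, hdrop] at h1
    rw [h1, List.take_append_drop]

lemma entry_cond_iff (host w : String) :
    ((host == w) || PySem.Str.endswith host ("." ++ w)) = true ↔
      (host = w ∨ ∃ k, ∃ h : k < host.toList.length, host.toList[k] = '.' ∧
        host.toList.drop (k + 1) = w.toList) := by
  have he : PySem.Str.endswith host ("." ++ w) = true ↔ ('.' :: w.toList) <:+ host.toList := by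
    rw [PySem.Str.endswith_eq, PySem.Chars.endswith_iff]
    simp
  simp only [Bool.or_eq_true, beq_iff_eq, he, suffix_dot_iff]

lemma A_true_iff (host : String) (allowlist : List String) :
    host_matches_allowlist_py host allowlist = true ↔ MatchesProp host allowlist := by
  induction allowlist with
  | nil => simp [host_matches_allowlist_py, MatchesProp]
  | cons a rest ih =>
    simp only [host_matches_allowlist_py]
    by_cases hne : PySem.Str.lower (PySem.Str.strip a) = ""
    · rw [if_pos hne, ih]
      have hs : PySem.Str.strip a = "" := (lower_eq_empty_iff _).mp hne
      simp [MatchesProp, hs]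
    · rw [if_neg hne]
      have hs : PySem.Str.strip a ≠ "" := fun h => hne (by rw [h]; rfl)
      by_cases hc : ((host == PySem.Str.lower (PySem.Str.strip a)) ||
          PySem.Str.endswith host ("." ++ PySem.Str.lower (PySem.Str.strip a))) = true
      · rw [if_pos hc]
        simp only [true_iff, MatchesProp]
        exact ⟨a, by simp, hs, (entry_cond_iff host _).mp hc⟩
      · rw [if_neg hc, ih]
        simp only [MatchesProp, List.mem_cons]
        constructor
        · rintro ⟨b, hb, h⟩; exact ⟨b, Or.inr hb, h⟩
        · rintro ⟨b, hb | hb, h⟩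
          · subst hb
            exact absurd ((entry_cond_iff host _).mpr h.2) hc
          · exact ⟨b, hb, h⟩

lemma B_true_iff (host : String) (allowlist : List String) :
    host_matches_allowlist_py_alt host allowlist = true ↔ MatchesProp host allowlist := by
  simp only [host_matches_allowlist_py_alt, List.any_eq_true, List.mem_cons,
    PySem.Set.contains_iff, PySem.Set.mem_ofList, List.mem_map, List.mem_filter,
    List.mem_filterMap, PySem.List.mem_enumerate_iff, MatchesProp]
  constructor
  · rintro ⟨c, hc | hc, a, ⟨ha, hane⟩, hval⟩
    · subst hc
      exact ⟨a, ha, by simpa using hane, Or.inl hval.symm⟩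
    · obtain ⟨p, ⟨k, hk, rfl⟩, hp⟩ := hc
      simp only at hp
      split_ifs at hp with hdot
      have hceq : c = String.ofList (host.toList.drop ((((0:Int) + (k:Int)).toNat) + 1)) :=
        (Option.some_inj.mp hp).symm
      have h1 : PySem.Str.strip a ≠ "" := by simpa using hane
      have h2 : host.toList.drop (k + 1) = (PySem.Str.lower (PySem.Str.strip a)).toList := by
        rw [hval, hceq]
        simp
      exact ⟨a, ha, h1, Or.inr ⟨k, hk, hdot, h2⟩⟩
  · rintro ⟨a, ha, hane, hcase⟩
    rcases hcase with hh | ⟨k, hk, hdot, hdrop⟩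
    · exact ⟨host, Or.inl rfl, a, ⟨ha, by simpa using hane⟩, hh.symm⟩
    · refine ⟨String.ofList (host.toList.drop (k + 1)), Or.inr ?_, a, ⟨ha, by simpa using hane⟩, ?_⟩
      · exact ⟨((k : Int), host.toList[k]), ⟨k, hk, by simp⟩, by simp [hdot]⟩
      · rw [hdrop, String.ofList_toList]

-- ===== VERDICT (by name: the statement is the Claim_ definition above) =====
theorem host_matches_allowlist_py_spec : Claim_equal_host_matches_allowlist_py := by
  intro host allowlist _
  unfold Spec_host_matches_allowlist_py
  rw [Bool.eq_iff_iff, A_true_iff, B_true_iff]
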